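-- pv_equiv track=rewrite | github.com/UBE2C/esoInterpreters | miniStringFuck/Python_implementation/msfInterpreter.py | MSF_interpreter
-- ===== SOURCE A (Python) =====
-- def MSF_interpreter(code: str) -> str:
--     mem_cell: int = 0
--     mem_array: list[int] = []
--     output_str: str = ""
--
--     for i in range(len(code)):
--         if code[i] == "+":  # Increment as needed
--             mem_cell += 1
--             if mem_cell == 256:  # Ensure it is an 8 bit cell
--                 mem_cell = 0
--         elif code[i] == ".":
--             mem_array.append(mem_cell)  # Output the cell into an int array
--
--     for i in range(len(mem_array)):  # Translate the int array to ASCII chars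
--         output_str += chr(mem_array[i])
--
--     return output_str
-- ===== SOURCE B (Python) =====
-- def MSF_interpreter(code: str) -> str:
--     # Split the program at each '.'; each output equals the cumulative number
--     # of '+' in all segments up to that '.', taken mod 256 (the 8-bit cell).
--     parts = code.split(".")
--     total = 0
--     out = []
--     for seg in parts[:-1]:
--         total += seg.count("+")
--         out.append(chr(total % 256))
--     return "".join(out)
-- ===== Notes on version B (the rewrite author's own statement) =====
-- stated objective: faster
-- what changed: B splits the program on the output instruction and maps the cumulative counts of increment instructions per segment (mod 256) to characters, replacing A's per-character state machine with an 8-bit reset branch and a separate int-array-to-string translation pass; the segment counting is done by C-level str.split/str.count instead of a Python-level loop.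
import Mathlib
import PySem

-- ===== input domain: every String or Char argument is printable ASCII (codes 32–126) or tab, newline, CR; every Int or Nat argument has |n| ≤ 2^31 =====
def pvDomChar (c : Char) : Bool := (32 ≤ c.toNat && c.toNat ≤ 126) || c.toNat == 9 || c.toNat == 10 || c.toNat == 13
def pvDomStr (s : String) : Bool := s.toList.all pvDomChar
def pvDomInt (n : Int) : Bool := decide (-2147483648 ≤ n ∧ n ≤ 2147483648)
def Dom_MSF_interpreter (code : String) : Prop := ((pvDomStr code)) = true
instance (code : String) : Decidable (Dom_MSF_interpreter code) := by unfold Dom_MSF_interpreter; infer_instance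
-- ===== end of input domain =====

-- B splits the program on '.' and maps cumulative '+'-counts (mod 256) to chars,
-- replacing A's per-character state machine and second translate pass (objective: alternative).

-- ===== PORT A =====
-- first loop of A: builds (mem_cell, mem_array)
def msfLoopA : List Char → Int → List Int → List Int
  | [], _, mem => mem
  | ch :: rest, cell, mem =>
    if ch = '+' then
      let cell' := cell + 1
      let cell'' := if cell' = 256 then 0 else cell'
      msfLoopA rest cell'' mem
    else if ch = '.' then msfLoopA rest cell (mem ++ [cell])
    else msfLoopA rest cell mem

def MSF_interpreter (code : String) : String :=
  -- second loop of A: output_str += chr(mem_array[i])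
  (msfLoopA code.toList 0 []).foldl (fun s n => s ++ String.ofList [Char.ofNat n.toNat]) ""

-- ===== PORT B =====
-- Source B: parts = code.split("."); loop over parts[:-1] accumulating seg.count("+")
def MSF_interpreter_alt (code : String) : String :=
  String.ofList
    (((PySem.List.slice (PySem.Chars.splitOn code.toList ['.']) none (some (-1))).foldl
      (fun (st : Int × List Char) seg =>
        let total := st.1 + (PySem.Chars.count seg ['+'] : Int)
        (total, st.2 ++ [Char.ofNat (PySem.Int.mod total 256).toNat]))
      (0, [])).2)

-- ===== PRECONDITION & SPEC =====
def Spec_MSF_interpreter (code : String) (out : String) : Prop := out = MSF_interpreter_alt code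
instance (code : String) (out : String) : Decidable (Spec_MSF_interpreter code out) := by unfold Spec_MSF_interpreter; infer_instance

-- ===== CLAIM (what is proved, stated in full; the proofs are below) =====
def Claim_equal_MSF_interpreter : Prop := ∀ (code : String), Dom_MSF_interpreter code → Spec_MSF_interpreter code (MSF_interpreter code)

-- ===== LEMMAS AND PROOFS =====

-- common reference: the number of '+' seen so far at each '.'
def msfOuts : List Char → Int → List Int
  | [], _ => []
  | c :: rest, k =>
    if c = '+' then msfOuts rest (k + 1)
    else if c = '.' then k :: msfOuts rest k
    else msfOuts rest k

theorem pymod256 (b : Int) (hb : 0 ≤ b) : PySem.Int.mod b 256 = b % 256 :=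
  PySem.Int.mod_eq_emod_of_pos (by norm_num : (0:Int) < 256)

-- ---- A side: msfLoopA appends msfOuts values reduced mod 256 ----
theorem msfLoopA_eq (l : List Char) (a b : Int) (m : List Int) (hb : 0 ≤ b)
    (ha : a = b % 256) :
    msfLoopA l a m = m ++ (msfOuts l b).map (· % 256) := by
  induction l generalizing a b m with
  | nil => simp [msfLoopA, msfOuts]
  | cons ch rest ih =>
    by_cases h1 : ch = '+'
    · simp only [msfLoopA, msfOuts, h1, if_pos rfl]
      have hb' : 0 ≤ b + 1 := by omega
      have h0 : 0 ≤ b % 256 := Int.emod_nonneg b (by norm_num)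
      have h255 : b % 256 < 256 := Int.emod_lt_of_pos b (by norm_num)
      by_cases h2 : a + 1 = 256
      · rw [if_pos h2]; exact ih 0 (b + 1) m hb' (by omega)
      · rw [if_neg h2]; exact ih (a + 1) (b + 1) m hb' (by omega)
    · by_cases h2 : ch = '.'
      · simp only [msfLoopA, msfOuts, h1, h2, if_neg h1, if_pos rfl, List.map]
        rw [ih a b (m ++ [a]) hb ha, ha]
        simp
      · simp only [msfLoopA, msfOuts, if_neg h1, if_neg h2]
        exact ih a b m hb ha

-- A's translate loop produces the string of the mapped chars
theorem foldl_chr (mem : List Int) (l : List Char) :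
    mem.foldl (fun s n => s ++ String.ofList [Char.ofNat n.toNat]) (String.ofList l)
      = String.ofList (l ++ mem.map (fun n => Char.ofNat n.toNat)) := by
  induction mem generalizing l with
  | nil => simp
  | cons n rest ih =>
    simp only [List.foldl, List.map]
    rw [show String.ofList l ++ String.ofList [Char.ofNat n.toNat]
          = String.ofList (l ++ [Char.ofNat n.toNat]) by rw [← String.ofList_append]]
    rw [ih]
    simp

-- ---- B side ----
-- simple recursive characterisation of splitting on a single '.'
def sod : List Char → List Char → List (List Char)
  | cur, [] => [cur.reverse]
  | cur, c :: rest => if c = '.' then cur.reverse :: sod [] rest else sod (c :: cur) rest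

theorem sod_ne_nil (cur l : List Char) : sod cur l ≠ [] := by
  cases l with
  | nil => simp [sod]
  | cons c rest => by_cases h : c = '.' <;> simp [sod, h] <;> exact sod_ne_nil _ _

theorem splitOn_go_eq (l cur : List Char) (acc : List (List Char)) (fuel : Nat)
    (hf : l.length ≤ fuel) :
    PySem.Chars.splitOn.go ['.'] fuel l cur acc = acc.reverse ++ sod cur l := by
  induction l generalizing cur acc fuel with
  | nil =>
    cases fuel with
    | zero => simp [PySem.Chars.splitOn.go, sod]
    | succ n => simp [PySem.Chars.splitOn.go, sod]
  | cons c rest ih =>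
    cases fuel with
    | zero => simp at hf
    | succ n =>
      have hf' : rest.length ≤ n := by simpa using hf
      by_cases h : c = '.'
      · subst h
        have hpre : (['.'] : List Char).isPrefixOf ('.' :: rest) = true := by
          simp [List.isPrefixOf]
        simp only [PySem.Chars.splitOn.go, hpre, if_true, sod, if_pos rfl]
        rw [show List.drop (List.length (['.'] : List Char)) ('.' :: rest) = rest from by simp]
        rw [ih [] (cur.reverse :: acc) n hf']
        simp
      · have hpre : (['.'] : List Char).isPrefixOf (c :: rest) = false := by
          simp [List.isPrefixOf]; exact fun hc => absurd hc.symm h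
        simp only [PySem.Chars.splitOn.go, hpre, Bool.false_eq_true, if_false, sod, if_neg h]
        exact ih (c :: cur) acc n hf'

theorem splitOn_eq_sod (l : List Char) :
    PySem.Chars.splitOn l ['.'] = sod [] l := by
  unfold PySem.Chars.splitOn
  exact splitOn_go_eq l [] [] (l.length + 1) (by omega)

theorem count_go_eq (l : List Char) (acc fuel : Nat) (hf : l.length ≤ fuel) :
    PySem.Chars.count.go ['+'] fuel l acc = acc + l.count '+' := by
  induction l generalizing acc fuel with
  | nil => cases fuel <;> simp [PySem.Chars.count.go]
  | cons c rest ih =>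
    cases fuel with
    | zero => simp at hf
    | succ n =>
      have hf' : rest.length ≤ n := by simpa using hf
      by_cases h : c = '+'
      · subst h
        have hpre : (['+'] : List Char).isPrefixOf ('+' :: rest) = true := by
          simp [List.isPrefixOf]
        simp only [PySem.Chars.count.go, hpre, if_true]
        rw [show List.drop (List.length (['+'] : List Char)) ('+' :: rest) = rest from by simp]
        rw [ih (acc + 1) n hf']
        simp [List.count_cons]
        omega
      · have hpre : (['+'] : List Char).isPrefixOf (c :: rest) = false := by
          simp [List.isPrefixOf]; exact fun hc => absurd hc.symm h
        simp only [PySem.Chars.count.go, hpre, Bool.false_eq_true, if_false]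
        rw [ih acc n hf']
        simp [List.count_cons, h]

theorem count_eq_count (l : List Char) :
    PySem.Chars.count l ['+'] = l.count '+' := by
  unfold PySem.Chars.count
  simp only [List.isEmpty_cons, Bool.false_eq_true, if_false]
  simpa using count_go_eq l 0 l.length (le_refl _)

-- B's fold over a segment list, in characterisable form
def bTotals : List (List Char) → Int → List Int
  | [], _ => []
  | s :: ss, t => (t + (s.count '+' : Int)) :: bTotals ss (t + (s.count '+' : Int))

theorem bfold_eq_totals (segs : List (List Char)) (t : Int) (out : List Char) (ht : 0 ≤ t) :
    (segs.foldl
      (fun (st : Int × List Char) seg =>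
        let total := st.1 + (PySem.Chars.count seg ['+'] : Int)
        (total, st.2 ++ [Char.ofNat (PySem.Int.mod total 256).toNat]))
      (t, out)).2
    = out ++ (bTotals segs t).map (fun k => Char.ofNat (k % 256).toNat) := by
  induction segs generalizing t out with
  | nil => simp [bTotals]
  | cons s ss ih =>
    simp only [List.foldl, bTotals, List.map]
    have ht' : (0:Int) ≤ t + (s.count '+' : Int) := by positivity
    rw [count_eq_count, pymod256 _ ht', ih _ _ ht']
    simp

-- cumulative totals of the segments (minus the last) are exactly msfOuts
theorem totals_sod (l cur : List Char) (t : Int) :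
    bTotals (sod cur l).dropLast t = msfOuts l (t + (cur.count '+' : Int)) := by
  induction l generalizing cur t with
  | nil => simp [sod, bTotals, msfOuts]
  | cons c rest ih =>
    by_cases h1 : c = '.'
    · subst h1
      simp only [sod, if_pos rfl, msfOuts, if_neg (by decide : ¬ ('.' : Char) = '+'), if_true]
      rw [List.dropLast_cons_of_ne_nil (sod_ne_nil [] rest)]
      simp only [bTotals, List.count_reverse]
      have := ih [] (t + (cur.count '+' : Int))
      simp only [List.count_nil, Int.natCast_zero, add_zero] at this
      rw [this]
    · simp only [sod, if_neg h1]
      by_cases h2 : c = '+'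
      · subst h2
        simp only [msfOuts, if_pos rfl]
        rw [ih ('+' :: cur) t]
        simp [List.count_cons]
        ring_nf
      · simp only [msfOuts, if_neg h2, if_neg h1]
        rw [ih (c :: cur) t]
        simp [List.count_cons, h2]

theorem slice_neg_one_eq_dropLast {α : Type} (xs : List α) (h : xs ≠ []) :
    PySem.List.slice xs none (some (-1)) = xs.dropLast := by
  have hlen : 1 ≤ xs.length := by
    cases xs with | nil => exact absurd rfl h | cons a l => simp
  simp only [PySem.List.slice, PySem.List.clampIdx]
  split_ifs with h1 h2
  · omega
  · rw [List.dropLast_eq_take]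
    simp only [List.drop_zero]
    congr 1
    omega
  · omega

-- ===== VERDICT (by name: the statement is the Claim_ definition above) =====
theorem MSF_interpreter_spec : Claim_equal_MSF_interpreter := by
  intro code _
  unfold Spec_MSF_interpreter MSF_interpreter MSF_interpreter_alt
  rw [splitOn_eq_sod, slice_neg_one_eq_dropLast _ (sod_ne_nil [] code.toList)]
  rw [msfLoopA_eq code.toList 0 0 [] (le_refl 0) rfl]
  rw [bfold_eq_totals _ 0 [] (le_refl 0)]
  have ht := totals_sod code.toList [] 0
  simp only [List.count_nil, Int.natCast_zero, add_zero] at ht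
  rw [ht]
  calc ((msfOuts code.toList 0).map (· % 256)).foldl
        (fun s n => s ++ String.ofList [Char.ofNat n.toNat]) ""
      = String.ofList ([] ++ ((msfOuts code.toList 0).map (· % 256)).map
          (fun n => Char.ofNat n.toNat)) := by
        simpa using foldl_chr ((msfOuts code.toList 0).map (· % 256)) []
    _ = String.ofList ((msfOuts code.toList 0).map (fun k => Char.ofNat (k % 256).toNat)) := by
        simp [List.map_map, Function.comp_def]
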